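-- pv_equiv track=rewrite | github.com/iammrhelo/11731 | gnmt/utils.py | input_transpose
-- ===== SOURCE A (Python) =====
-- def input_transpose(sents, pad_token):
--     """
--     This function transforms a list of sentences of shape (batch_size, token_num) into
--     a list of shape (token_num, batch_size). You may find this function useful if you
--     use pytorch
--     """
--     max_len = max(len(s) for s in sents)
--     batch_size = len(sents)
--
--     sents_t = []
--     for i in range(max_len):
--         sents_t.append([sents[k][i] if len(sents[k]) >
--                         i else pad_token for k in range(batch_size)])
--
--     return sents_t
-- ===== SOURCE B (Python) =====
-- def input_transpose(sents, pad_token):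
--     # Streaming batch-major transpose: merge one sentence at a time into the
--     # growing column rows; no max-length precomputation, no per-index scans.
--     rows = []
--     for n, s in enumerate(sents):
--         if len(s) > len(rows):
--             rows += [[pad_token] * n for _ in range(len(s) - len(rows))]
--         for i, row in enumerate(rows):
--             row.append(s[i] if i < len(s) else pad_token)
--     return rows
-- ===== Notes on version B (the rewrite author's own statement) =====
-- stated objective: alternative
-- what changed: B is a streaming batch-major transpose: instead of precomputing max_len and building each output row by scanning all sentences with per-index length checks, it makes a single pass over the sentences, merging each sentence into the growing column rows (extending with pad-filled rows when a longer sentence arrives); Pre_ excludes only empty sents, where A raises ValueError from max().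
import Mathlib
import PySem

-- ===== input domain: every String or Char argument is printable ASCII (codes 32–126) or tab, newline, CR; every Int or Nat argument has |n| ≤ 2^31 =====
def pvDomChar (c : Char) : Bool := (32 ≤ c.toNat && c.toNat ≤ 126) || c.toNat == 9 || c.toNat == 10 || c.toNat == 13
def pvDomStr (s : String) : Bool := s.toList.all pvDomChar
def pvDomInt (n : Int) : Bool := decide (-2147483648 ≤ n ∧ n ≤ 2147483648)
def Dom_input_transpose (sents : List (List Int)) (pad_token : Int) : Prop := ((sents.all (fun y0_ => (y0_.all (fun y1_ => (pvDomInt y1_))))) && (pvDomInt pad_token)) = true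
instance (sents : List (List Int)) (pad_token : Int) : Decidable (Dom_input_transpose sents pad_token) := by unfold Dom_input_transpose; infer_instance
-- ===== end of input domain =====

-- B is a streaming batch-major transpose: one pass over the sentences, each merged into
-- the growing column rows; no max-length precomputation, no per-index length scans.

-- ===== PORT A =====
-- Literal port of A: max(len(s) for s in sents), then for i in range(max_len) append the
-- comprehension over k in range(batch_size).  max() on the empty list raises ValueError in
-- Python (the `none` branch); those inputs are excluded by Pre_input_transpose.
def input_transpose (sents : List (List Int)) (pad_token : Int) : List (List Int) :=
  match PySem.List.max? (sents.map (fun s => (s.length : Int))) (fun y => y) with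
  | none => []  -- Python raises ValueError here (sents = []); outside Pre_input_transpose
  | some max_len =>
    let batch_size := sents.length
    (List.range max_len.toNat).foldl
      (fun (sents_t : List (List Int)) (i : Nat) =>
        sents_t ++ [(List.range batch_size).map (fun k =>
          if ((sents.getD k []).length : Int) > (i : Int) then (sents.getD k []).getD i 0
          else pad_token)])
      []

-- ===== PORT B =====
-- One iteration of B's `for n, s in enumerate(sents)` body: extend `rows` with pad-filled
-- rows if this sentence is longer than any seen so far, then append the i-th token
-- (or pad) to every row (the `for i, row in enumerate(rows): row.append(...)` loop).
def pvStep (pad : Int) (n : Nat) (rows : List (List Int)) (s : List Int) : List (List Int) :=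
  let rows' := if s.length > rows.length
    then rows ++ List.replicate (s.length - rows.length) (List.replicate n pad)
    else rows
  rows'.zipIdx.map (fun q => q.1 ++ [if q.2 < s.length then s.getD q.2 pad else pad])

-- B's outer loop over `enumerate(sents)` with the running sentence counter n.
def pvLoop (pad : Int) (rows : List (List Int)) (n : Nat) : List (List Int) → List (List Int)
  | [] => rows
  | s :: rest => pvLoop pad (pvStep pad n rows s) (n + 1) rest

def input_transpose_alt (sents : List (List Int)) (pad_token : Int) : List (List Int) :=
  pvLoop pad_token [] 0 sents

-- ===== PRECONDITION & SPEC =====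
-- Pre_ excludes only sents = [], where Python A raises ValueError (max() of an empty sequence).
def Pre_input_transpose (sents : List (List Int)) (pad_token : Int) : Prop := sents ≠ []
instance (sents : List (List Int)) (pad_token : Int) : Decidable (Pre_input_transpose sents pad_token) := by unfold Pre_input_transpose; infer_instance

def pvWitness_input_transpose : List (List Int) × Int := ([[1, 2], [3]], 0)

def Spec_input_transpose (sents : List (List Int)) (pad_token : Int) (out : List (List Int)) : Prop := out = input_transpose_alt sents pad_token
instance (sents : List (List Int)) (pad_token : Int) (out : List (List Int)) : Decidable (Spec_input_transpose sents pad_token out) := by unfold Spec_input_transpose; infer_instance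

-- ===== CLAIM (what is proved, stated in full; the proofs are below) =====
def Claim_equal_input_transpose : Prop := ∀ (sents : List (List Int)) (pad_token : Int), Dom_input_transpose sents pad_token → Pre_input_transpose sents pad_token → Spec_input_transpose sents pad_token (input_transpose sents pad_token)
-- ===== LEMMAS AND PROOFS =====

/-- max of sentence lengths, in the structural (foldr) form both inductions use. -/
def pvMaxLen (sents : List (List Int)) : Nat :=
  sents.foldr (fun s m => max s.length m) 0

/-- the transposed columns of a prefix: the loop invariant's value of `rows`. -/
def pvCols (pad : Int) (pre : List (List Int)) : List (List Int) :=
  (List.range (pvMaxLen pre)).map (fun i => pre.map (fun t => t.getD i pad))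

theorem pv_foldr_max_init (ss : List (List Int)) (a b : Nat) :
    ss.foldr (fun s m => max s.length m) (max a b) =
      max b (ss.foldr (fun s m => max s.length m) a) := by
  induction ss with
  | nil => simp [Nat.max_comm]
  | cons t ts ih =>
    simp only [List.foldr_cons, ih]
    exact max_left_comm _ _ _

theorem pvMaxLen_append_singleton (pre : List (List Int)) (s : List Int) :
    pvMaxLen (pre ++ [s]) = max s.length (pvMaxLen pre) := by
  unfold pvMaxLen
  rw [List.foldr_append, List.foldr_cons, List.foldr_nil, ← Nat.max_comm 0 s.length,
    pv_foldr_max_init]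

theorem pv_length_le_pvMaxLen {t : List Int} {pre : List (List Int)} (h : t ∈ pre) :
    t.length ≤ pvMaxLen pre := by
  induction pre with
  | nil => cases h
  | cons u us ih =>
    rcases List.mem_cons.mp h with rfl | h'
    · exact Nat.le_max_left _ _
    · exact Nat.le_trans (ih h') (Nat.le_max_right _ _)

theorem pv_col_pad (pad : Int) (pre : List (List Int)) (i : Nat) (hi : pvMaxLen pre ≤ i) :
    pre.map (fun t => t.getD i pad) = List.replicate pre.length pad := by
  rw [List.eq_replicate_iff]
  refine ⟨by simp, ?_⟩
  intro b hb
  rcases List.mem_map.mp hb with ⟨t, ht, rfl⟩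
  exact List.getD_eq_default _ _ (Nat.le_trans (pv_length_le_pvMaxLen ht) hi)

theorem pv_getD_if (pad : Int) (s : List Int) (i : Nat) :
    (if i < s.length then s.getD i pad else pad) = s.getD i pad := by
  split
  · rfl
  · exact (List.getD_eq_default _ _ (Nat.le_of_not_lt ‹¬ i < s.length›)).symm

theorem pvStep_cols (pad : Int) (pre : List (List Int)) (s : List Int) :
    pvStep pad pre.length (pvCols pad pre) s = pvCols pad (pre ++ [s]) := by
  unfold pvStep
  have hrows : (pvCols pad pre).length = pvMaxLen pre := by simp [pvCols]
  have hM := pvMaxLen_append_singleton pre s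
  have hcols' :
      (if s.length > (pvCols pad pre).length
        then pvCols pad pre ++
          List.replicate (s.length - (pvCols pad pre).length) (List.replicate pre.length pad)
        else pvCols pad pre) =
      (List.range (pvMaxLen (pre ++ [s]))).map (fun i => pre.map (fun t => t.getD i pad)) := by
    rw [hrows, hM]
    by_cases hls : s.length > pvMaxLen pre
    · rw [if_pos hls, Nat.max_eq_left (Nat.le_of_lt hls)]
      have hsplit : s.length = pvMaxLen pre + (s.length - pvMaxLen pre) := by omega
      rw [hsplit, List.range_add, List.map_append]
      congr 1
      symm
      rw [List.eq_replicate_iff]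
      refine ⟨by simp, ?_⟩
      intro b hb
      rcases List.mem_map.mp hb with ⟨i, hi, rfl⟩
      rcases List.mem_map.mp hi with ⟨x, _, rfl⟩
      exact pv_col_pad pad pre _ (Nat.le_add_right _ _)
    · rw [if_neg hls, Nat.max_eq_right (Nat.le_of_not_lt hls)]
      rfl
  rw [hcols']
  apply List.ext_getElem
  · simp [pvCols]
  · intro i h1 h2
    simp only [List.getElem_map, List.getElem_zipIdx, List.getElem_range, Nat.zero_add,
      pvCols] at *
    rw [pv_getD_if, List.map_append, List.map_cons, List.map_nil]

theorem pvLoop_cols (pad : Int) (rest : List (List Int)) :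
    ∀ (pre : List (List Int)), pvLoop pad (pvCols pad pre) pre.length rest =
      pvCols pad (pre ++ rest) := by
  induction rest with
  | nil => intro pre; simp [pvLoop]
  | cons s rs ih =>
    intro pre
    rw [pvLoop, pvStep_cols]
    have := ih (pre ++ [s])
    simpa using this

theorem pv_alt_eq_cols (sents : List (List Int)) (pad : Int) :
    input_transpose_alt sents pad = pvCols pad sents := by
  have h := pvLoop_cols pad sents []
  simpa [input_transpose_alt, pvCols, pvMaxLen] using h

/-- A's inner comprehension over k in range(batch_size) is a map over sents. -/
theorem pv_colA (sents : List (List Int)) (pad : Int) (i : Nat) :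
    (List.range sents.length).map (fun k =>
        if ((sents.getD k []).length : Int) > (i : Int) then (sents.getD k []).getD i 0
        else pad) =
      sents.map (fun s => s.getD i pad) := by
  induction sents with
  | nil => simp
  | cons s ss ih =>
    rw [List.length_cons, List.range_succ_eq_map, List.map_cons, List.map_map,
      List.map_cons]
    congr 1
    · simp only [List.getD_cons_zero]
      by_cases h : i < s.length
      · have : ((s.length : Int) > (i : Int)) := by exact_mod_cast h
        simp [this, List.getD, h]
      · have hc : ¬ ((s.length : Int) > (i : Int)) := by
          simp only [gt_iff_lt, not_lt]; exact_mod_cast Nat.not_lt.mp h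
        simp [hc, List.getD, List.getElem?_eq_none (Nat.not_lt.mp h)]
      -- the tail goal is `ih` up to defeq and is closed by `congr 1` itself

/-- Python's running-max loop over the casted lengths is pvMaxLen, in ℤ. -/
theorem pv_foldl_max_cast (l : List (List Int)) (a : Nat) :
    (l.map (fun s => (s.length : Int))).foldl max (a : Int) =
      ((l.foldr (fun s m => max s.length m) a : Nat) : Int) := by
  induction l generalizing a with
  | nil => simp
  | cons s ss ih =>
    simp only [List.map_cons, List.foldl_cons, List.foldr_cons]
    rw [← Nat.cast_max, ih, pv_foldr_max_init]

theorem pv_max?_eq (s : List Int) (ss : List (List Int)) :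
    PySem.List.max? ((s :: ss).map (fun u => (u.length : Int))) (fun y => y) =
      some ((pvMaxLen (s :: ss) : Nat) : Int) := by
  rw [List.map_cons, PySem.List.max?_id_cons, pv_foldl_max_cast]
  have h0 := pv_foldr_max_init ss 0 s.length
  rw [Nat.zero_max] at h0
  rw [h0]
  rfl

-- ===== VERDICT (by name: the statement is the Claim_ definition above) =====
theorem input_transpose_spec : Claim_equal_input_transpose := by
  intro sents pad _ hpre
  unfold Spec_input_transpose input_transpose
  rw [pv_alt_eq_cols]
  cases sents with
  | nil => exact absurd rfl hpre
  | cons s ss =>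
    rw [pv_max?_eq]
    simp only [Int.toNat_natCast]
    rw [PySem.List.foldl_append_singleton_eq_map, List.nil_append]
    exact List.map_congr_left (fun i _ => pv_colA (s :: ss) pad i)
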